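-- pv_equiv track=rewrite | github.com/benquick123/code-profiling | code/batch-2/dn6 - spet tviti/M-17009-2156.py | prestej_tvite
-- ===== SOURCE A (Python) =====
-- def avtor(tvit):
--     tvit = tvit.split(":")
--     return tvit[0]
--
-- def prestej_tvite(tviti):
--     dict = {}
--     for tvit in tviti:
--         if avtor(tvit) in dict:
--             stevilopojav = dict[avtor(tvit)] + 1
--             dict[avtor(tvit)] = stevilopojav
--         else:
--             dict[avtor(tvit)] = 1
--     return dict
-- ===== SOURCE B (Python) =====
-- def prestej_tvite(tviti):
--     avtorji = [tvit.split(":")[0] for tvit in tviti]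
--     return {a: avtorji.count(a) for a in dict.fromkeys(avtorji)}
-- ===== Notes on version B (the rewrite author's own statement) =====
-- stated objective: alternative
-- what changed: Replaces the single-pass running-counter dict update with a two-phase strategy: extract all authors, deduplicate them in first-occurrence order via dict.fromkeys, then count each distinct author's occurrences with list.count in a dict comprehension.
import Mathlib
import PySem

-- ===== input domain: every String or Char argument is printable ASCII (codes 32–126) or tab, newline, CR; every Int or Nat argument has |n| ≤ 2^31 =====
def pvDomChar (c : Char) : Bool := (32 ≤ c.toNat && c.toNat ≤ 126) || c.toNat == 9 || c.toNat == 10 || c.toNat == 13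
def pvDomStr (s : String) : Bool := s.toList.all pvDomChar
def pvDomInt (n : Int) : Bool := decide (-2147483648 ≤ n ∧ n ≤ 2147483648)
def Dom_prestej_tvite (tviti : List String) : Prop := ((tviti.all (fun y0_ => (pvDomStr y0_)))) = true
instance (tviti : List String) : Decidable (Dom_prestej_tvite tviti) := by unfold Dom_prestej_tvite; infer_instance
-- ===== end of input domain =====

-- B replaces A's single-pass running-counter dict loop by author extraction + ordered dedup + per-key count (alternative decomposition, same return value).


-- ===== PORT A =====
-- avtor: tvit.split(":")[0]; split is PySem.Str.split? (always `some` here: the sep ":" is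
-- non-empty, so `.getD []` never fires), and the pieces list is non-empty so index 0 is in range.
def avtor (tvit : String) : String :=
  let tvit := (PySem.Str.split? tvit ":").getD []
  PySem.List.pyGetD tvit 0 ""

def prestej_tvite (tviti : List String) : List (String × Int) :=
  (tviti.foldl (fun d tvit =>
      if PySem.Dict.contains d (avtor tvit) then
        let stevilopojav := PySem.Dict.getD d (avtor tvit) 0 + 1
        PySem.Dict.insert d (avtor tvit) stevilopojav
      else
        PySem.Dict.insert d (avtor tvit) 1)
    PySem.Dict.empty).items

-- ===== PORT B =====
def prestej_tvite_alt (tviti : List String) : List (String × Int) :=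
  let avtorji := tviti.map (fun tvit => PySem.List.pyGetD ((PySem.Str.split? tvit ":").getD []) 0 "")
  (PySem.List.dedup avtorji).map (fun a => (a, (avtorji.count a : Int)))

-- ===== PRECONDITION & SPEC =====
def Spec_prestej_tvite (tviti : List String) (out : List (String × Int)) : Prop := out = prestej_tvite_alt tviti
instance (tviti : List String) (out : List (String × Int)) : Decidable (Spec_prestej_tvite tviti out) := by unfold Spec_prestej_tvite; infer_instance

-- ===== CLAIM (what is proved, stated in full; the proofs are below) =====
def Claim_equal_prestej_tvite : Prop := ∀ (tviti : List String), Dom_prestej_tvite tviti → Spec_prestej_tvite tviti (prestej_tvite tviti)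

-- ===== LEMMAS AND PROOFS =====

-- A's loop step, on any dict, is exactly the counting insert 'd[k] = d.get(k,0)+1'.
lemma prestej_foldl_eq_counter_foldl (l : List String) (d : PySem.Dict String Int) :
    l.foldl (fun d tvit =>
      if PySem.Dict.contains d (avtor tvit) then
        let stevilopojav := PySem.Dict.getD d (avtor tvit) 0 + 1
        PySem.Dict.insert d (avtor tvit) stevilopojav
      else
        PySem.Dict.insert d (avtor tvit) 1) d
    = (l.map avtor).foldl (fun d x => PySem.Dict.insert d x (PySem.Dict.getD d x 0 + 1)) d := by
  induction l generalizing d with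
  | nil => rfl
  | cons t rest ih =>
    simp only [List.foldl_cons, List.map_cons]
    rw [ih]
    congr 1
    by_cases h : PySem.Dict.contains d (avtor t)
    · simp [h]
    · simp only [Bool.not_eq_true] at h
      simp [h, PySem.Dict.getD_of_not_contains _ _ h]

theorem prestej_tvite_spec : Claim_equal_prestej_tvite := by
  intro tviti _
  unfold Spec_prestej_tvite prestej_tvite prestej_tvite_alt
  rw [prestej_foldl_eq_counter_foldl,
      PySem.Dict.foldl_insert_getD_add_one_eq_counter,
      PySem.Dict.items_counter]
  rfl
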